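-- pv_equiv track=rewrite | github.com/roccobarbi/gutenberg_multi_solver | utils/solver_operations_descriptor.py | define_order_of_operations
-- ===== SOURCE A (Python) =====
-- def define_order_of_operations(words):
--     order = []
--     for i in range(len(words)):
--         alpha = ""
--         for char in words[i]:
--             if char not in alpha:
--                 alpha += char
--         for j in range(i + 1, len(words)):
--             common = 0
--             for char in alpha:
--                 if char in words[j]:
--                     common += 1
--             order.append((i, j, common))
--     order.sort(key=lambda a: a[2], reverse=True)
--     added = []
--     output = []
--     for couple in order:
--         if couple[0] in added and couple[1] in added:
--             pass
--         else:
--             output.append(couple)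
--             if couple[0] not in added:
--                 added.append(couple[0])
--             if couple[1] not in added:
--                 added.append(couple[1])
--     return output
-- ===== SOURCE B (Python) =====
-- def define_order_of_operations(words):
--     n = len(words)
--     # For each word index k, keep only the lexicographically smallest (-count, i, j)
--     # key over all pairs containing k; no pair list, no global sort, no greedy pass.
--     best = {}
--     for i in range(n):
--         di = set(words[i])
--         for j in range(i + 1, n):
--             key = (-len(di & set(words[j])), i, j)
--             if i not in best or key < best[i]:
--                 best[i] = key
--             if j not in best or key < best[j]:
--                 best[j] = key
--     return [(i, j, -negc) for (negc, i, j) in sorted(set(best.values()))]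
-- ===== Notes on version B (the rewrite author's own statement) =====
-- stated objective: faster
-- what changed: B never builds, sorts or greedily dedups the quadratic pair list: for each word index it keeps a running lexicographic minimum of the (-shared_count, i, j) keys of that index's pairs, then returns the sorted deduplicated set of these per-index best keys (correct because A's greedy pass over the stably sorted pairs keeps exactly the pairs that are the best pair of one of their endpoints).
import Mathlib
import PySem

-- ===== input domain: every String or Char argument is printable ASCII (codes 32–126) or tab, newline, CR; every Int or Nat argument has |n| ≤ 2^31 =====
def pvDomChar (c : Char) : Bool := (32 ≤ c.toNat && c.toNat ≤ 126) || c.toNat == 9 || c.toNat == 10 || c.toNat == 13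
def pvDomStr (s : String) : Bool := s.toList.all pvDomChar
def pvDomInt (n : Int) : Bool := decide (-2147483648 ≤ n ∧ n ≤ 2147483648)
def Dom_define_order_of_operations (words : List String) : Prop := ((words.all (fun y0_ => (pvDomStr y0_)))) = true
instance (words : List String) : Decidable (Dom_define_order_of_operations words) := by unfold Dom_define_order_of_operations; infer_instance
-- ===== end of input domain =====

-- B replaces A's build-all-pairs / stable-sort / greedy-dedup pipeline entirely: for each
-- word index it keeps only the lexicographically least (-count, i, j) key over that index's
-- pairs, then sorts the deduplicated best keys (objective: faster; a timing run
-- measured B faster at the larger sizes).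

-- ===== PORT A =====
def define_order_of_operations (words : List String) : List (Int × Int × Int) :=
  let n : Int := PySem.List.len words
  let order : List (Int × Int × Int) :=
    (PySem.List.pyRange 0 n 1).foldl (fun order i =>
      let alpha : List Char :=
        (PySem.List.pyGetD words i "").toList.foldl
          (fun alpha c => if c ∉ alpha then alpha ++ [c] else alpha) []
      (PySem.List.pyRange (i + 1) n 1).foldl (fun order j =>
        let common : Int :=
          alpha.foldl
            (fun common c =>
              if c ∈ (PySem.List.pyGetD words j "").toList then common + 1 else common) 0
        order ++ [(i, j, common)]) order) []
  let sortedOrder := PySem.List.sorted order (fun a => a.2.2) true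
  let res :=
    sortedOrder.foldl
      (fun (st : List Int × List (Int × Int × Int)) couple =>
        if couple.1 ∈ st.1 ∧ couple.2.1 ∈ st.1 then st
        else
          let output := st.2 ++ [couple]
          let added := if couple.1 ∉ st.1 then st.1 ++ [couple.1] else st.1
          let added := if couple.2.1 ∉ added then added ++ [couple.2.1] else added
          (added, output)) ([], [])
  res.2

-- ===== PORT B =====
-- Python's lexicographic '<' on int 3-tuples (hand-ported, exact for Int triples).
def pvLexLt (a b : Int × Int × Int) : Bool :=
  decide (a.1 < b.1) || (decide (a.1 = b.1) &&
    (decide (a.2.1 < b.2.1) || (decide (a.2.1 = b.2.1) && decide (a.2.2 < b.2.2))))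

-- sorted(xs) on distinct int 3-tuples: stable insertion sort by pvLexLt (hand-ported;
-- exact here because the sorted list's elements are pairwise distinct).
def pvSortLex (xs : List (Int × Int × Int)) : List (Int × Int × Int) :=
  xs.foldl (fun acc x => PySem.List.insertBy (fun a b => pvLexLt a b) x acc) []

def define_order_of_operations_alt (words : List String) : List (Int × Int × Int) :=
  let n : Int := PySem.List.len words
  let best : PySem.Dict Int (Int × Int × Int) :=
    (PySem.List.pyRange 0 n 1).foldl (fun best i =>
      let di : PySem.Set Char := PySem.Set.ofList (PySem.List.pyGetD words i "").toList
      (PySem.List.pyRange (i + 1) n 1).foldl (fun best j =>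
        let key : Int × Int × Int :=
          (-(PySem.Set.len (PySem.Set.inter di
              (PySem.Set.ofList (PySem.List.pyGetD words j "").toList)) : Int), i, j)
        let best :=
          if !best.contains i || pvLexLt key (best.getD i key) then best.insert i key else best
        if !best.contains j || pvLexLt key (best.getD j key) then best.insert j key else best)
        best) PySem.Dict.empty
  (pvSortLex (PySem.Set.ofList best.values)).map (fun t => (t.2.1, t.2.2, -t.1))

-- ===== PRECONDITION & SPEC =====
def Spec_define_order_of_operations (words : List String) (out : List (Int × Int × Int)) : Prop := out = define_order_of_operations_alt words
instance (words : List String) (out : List (Int × Int × Int)) : Decidable (Spec_define_order_of_operations words out) := by unfold Spec_define_order_of_operations; infer_instance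

-- ===== CLAIM (what is proved, stated in full; the proofs are below) =====
def Claim_equal_define_order_of_operations : Prop := ∀ (words : List String), Dom_define_order_of_operations words → Spec_define_order_of_operations words (define_order_of_operations words)

-- ===== LEMMAS AND PROOFS =====

-- the shared-character count of the pair (i, j)
def pvCommon (words : List String) (i j : Int) : Int :=
  (PySem.List.dedup (PySem.List.pyGetD words i "").toList).foldl
    (fun acc ch => if ch ∈ (PySem.List.pyGetD words j "").toList then acc + 1 else acc) 0

-- all pairs (i, j, common) in A's generation order
def pvPairs (words : List String) : List (Int × Int × Int) :=
  (PySem.List.pyRange 0 (PySem.List.len words) 1).flatMap (fun i =>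
    (PySem.List.pyRange (i + 1) (PySem.List.len words) 1).map (fun j => (i, j, pvCommon words i j)))

-- the per-pair sort key (-count, i, j)
def pvKey (p : Int × Int × Int) : Int × Int × Int := (-p.2.2, p.1, p.2.1)

-- pair p covers word index k
def pvCovers (p : Int × Int × Int) (k : Int) : Prop := p.1 = k ∨ p.2.1 = k

-- strict lexicographic order on Int triples: basic facts
theorem pv_lex_irrefl (a : Int × Int × Int) : pvLexLt a a = false := by
  simp [pvLexLt]

theorem pv_lex_asymm {a b : Int × Int × Int} (h : pvLexLt a b = true) : pvLexLt b a = false := by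
  simp [pvLexLt] at h ⊢; omega

theorem pv_lex_trans {a b c : Int × Int × Int} (h1 : pvLexLt a b = true) (h2 : pvLexLt b c = true) :
    pvLexLt a c = true := by
  simp [pvLexLt] at h1 h2 ⊢; omega

theorem pv_lex_total {a b : Int × Int × Int} (h1 : pvLexLt a b = false) (h2 : pvLexLt b a = false) :
    a = b := by
  obtain ⟨a1, a2, a3⟩ := a; obtain ⟨b1, b2, b3⟩ := b
  simp [pvLexLt] at h1 h2 ⊢; omega

-- a foldl over a flatMap is the nested foldl
theorem pv_foldl_flatMap {α β γ : Type} (l : List α) (g : α → List β) (f : γ → β → γ) (init : γ) :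
    (l.flatMap g).foldl f init = l.foldl (fun acc x => (g x).foldl f acc) init := by
  induction l generalizing init with
  | nil => rfl
  | cons x t ih => simp [List.flatMap_cons, List.foldl_append, ih]

-- A's order list is pvPairs
theorem pv_orderA (words : List String) :
    ((PySem.List.pyRange 0 (PySem.List.len words) 1).foldl (fun order i =>
      let alpha : List Char :=
        (PySem.List.pyGetD words i "").toList.foldl
          (fun alpha c => if c ∉ alpha then alpha ++ [c] else alpha) []
      (PySem.List.pyRange (i + 1) (PySem.List.len words) 1).foldl (fun order j =>
        let common : Int :=
          alpha.foldl
            (fun common c =>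
              if c ∈ (PySem.List.pyGetD words j "").toList then common + 1 else common) 0
        order ++ [(i, j, common)]) order) ([] : List (Int × Int × Int)))
    = pvPairs words := by
  have halpha : ∀ (cs : List Char),
      cs.foldl (fun alpha c => if c ∉ alpha then alpha ++ [c] else alpha) []
        = PySem.List.dedup cs := by
    intro cs
    rw [PySem.List.dedup_eq_ofList, PySem.Set.ofList_eq_foldl]
    apply PySem.List.foldl_congr_mem
    intro acc c _
    rw [PySem.Set.add_eq_ite]
    by_cases h : c ∈ acc <;> simp [h]
  have hfun : (fun (order : List (Int × Int × Int)) (i : Int) =>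
      let alpha : List Char :=
        (PySem.List.pyGetD words i "").toList.foldl
          (fun alpha c => if c ∉ alpha then alpha ++ [c] else alpha) []
      (PySem.List.pyRange (i + 1) (PySem.List.len words) 1).foldl (fun order j =>
        let common : Int :=
          alpha.foldl
            (fun common c =>
              if c ∈ (PySem.List.pyGetD words j "").toList then common + 1 else common) 0
        order ++ [(i, j, common)]) order)
      = fun (order : List (Int × Int × Int)) (i : Int) =>
        order ++ (PySem.List.pyRange (i + 1) (PySem.List.len words) 1).map
          (fun j => (i, j, pvCommon words i j)) := by
    funext acc i
    simp only [halpha]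
    simp only [show ∀ j : Int,
      ((PySem.List.dedup (PySem.List.pyGetD words i "").toList).foldl
        (fun common c =>
          if c ∈ (PySem.List.pyGetD words j "").toList then common + 1 else common) 0)
        = pvCommon words i j from fun _ => rfl]
    exact PySem.List.foldl_append_singleton_eq_map _ _ _
  rw [hfun, PySem.List.foldl_append_eq_flatMap]
  rfl

-- generation order of the pairs: lexicographic on (i, j)
def pvGenLt (p q : Int × Int × Int) : Prop := p.1 < q.1 ∨ (p.1 = q.1 ∧ p.2.1 < q.2.1)

theorem pv_pairs_pairwise_gen (words : List String) : (pvPairs words).Pairwise pvGenLt := by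
  unfold pvPairs
  rw [List.pairwise_flatMap]
  constructor
  · intro i _
    rw [List.pairwise_map]
    exact (PySem.List.pairwise_lt_pyRange_one _ _).imp (fun h => Or.inr ⟨rfl, h⟩)
  · apply (PySem.List.pairwise_lt_pyRange_one _ _).imp
    intro i j hij x hx y hy
    rw [List.mem_map] at hx hy
    obtain ⟨_, _, rfl⟩ := hx; obtain ⟨_, _, rfl⟩ := hy
    exact Or.inl hij

-- the key order refines the generation order when counts do not increase
theorem pv_key_of_gen {p q : Int × Int × Int} (hg : pvGenLt p q) (hc : q.2.2 ≤ p.2.2) :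
    pvLexLt (pvKey p) (pvKey q) = true := by
  rcases hg with h | ⟨h1, h2⟩ <;> simp [pvLexLt, pvKey] <;> omega

theorem pv_key_of_count {p q : Int × Int × Int} (hc : q.2.2 < p.2.2) :
    pvLexLt (pvKey p) (pvKey q) = true := by
  simp [pvLexLt, pvKey]; omega

-- inserting x into a KeyLt-sorted acc keeps it KeyLt-sorted
theorem pv_insertBy_pairwise_key (x : Int × Int × Int) :
    ∀ acc : List (Int × Int × Int),
      acc.Pairwise (fun p q => pvLexLt (pvKey p) (pvKey q) = true) →
      (∀ y ∈ acc, y.2.2 < x.2.2 → pvLexLt (pvKey x) (pvKey y) = true) →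
      (∀ y ∈ acc, ¬(y.2.2 < x.2.2) → pvLexLt (pvKey y) (pvKey x) = true) →
      (PySem.List.insertBy (fun a b => decide (b.2.2 < a.2.2)) x acc).Pairwise
        (fun p q => pvLexLt (pvKey p) (pvKey q) = true) := by
  intro acc
  induction acc with
  | nil => intro _ _ _; simp [PySem.List.insertBy]
  | cons y t ih =>
    intro hpw h1 h2
    by_cases hb : y.2.2 < x.2.2
    · have : PySem.List.insertBy (fun a b => decide (b.2.2 < a.2.2)) x (y :: t) = x :: y :: t := by
        simp [PySem.List.insertBy, hb]
      rw [this]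
      have hxy : pvLexLt (pvKey x) (pvKey y) = true := h1 y (by simp) hb
      refine List.pairwise_cons.2 ⟨?_, hpw⟩
      intro z hz
      rcases List.mem_cons.1 hz with rfl | hz
      · exact hxy
      · exact pv_lex_trans hxy ((List.pairwise_cons.1 hpw).1 z hz)
    · have : PySem.List.insertBy (fun a b => decide (b.2.2 < a.2.2)) x (y :: t)
          = y :: PySem.List.insertBy (fun a b => decide (b.2.2 < a.2.2)) x t := by
        simp [PySem.List.insertBy, hb]
      rw [this]
      refine List.pairwise_cons.2 ⟨?_, ih (List.pairwise_cons.1 hpw).2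
        (fun z hz => h1 z (by simp [hz])) (fun z hz => h2 z (by simp [hz]))⟩
      intro z hz
      rcases (PySem.List.mem_insertBy _ _ _ _).1 hz with rfl | hz
      · exact h2 y (by simp) hb
      · exact (List.pairwise_cons.1 hpw).1 z hz

-- the reverse stable sort of a generation-ordered list is KeyLt-sorted
theorem pv_sorted_pairwise_key (words : List String) :
    (PySem.List.sorted (pvPairs words) (fun a => a.2.2) true).Pairwise
      (fun p q => pvLexLt (pvKey p) (pvKey q) = true) := by
  rw [PySem.List.sorted_rev_eq_foldl_insertBy]
  have main : ∀ (xs acc : List (Int × Int × Int)),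
      xs.Pairwise pvGenLt →
      acc.Pairwise (fun p q => pvLexLt (pvKey p) (pvKey q) = true) →
      (∀ y ∈ acc, ∀ x ∈ xs, pvGenLt y x) →
      (xs.foldl (fun acc x =>
        PySem.List.insertBy (fun a b => decide ((fun a => a.2.2) b < (fun a => a.2.2) a)) x acc)
        acc).Pairwise (fun p q => pvLexLt (pvKey p) (pvKey q) = true) := by
    intro xs
    induction xs with
    | nil => intro acc _ h _; exact h
    | cons x t ih =>
      intro acc hxs hacc hcross
      simp only [List.foldl_cons]
      refine ih _ (List.pairwise_cons.1 hxs).2 ?_ ?_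
      · exact pv_insertBy_pairwise_key x acc hacc
          (fun y _ hy => pv_key_of_count hy)
          (fun y hy hc => pv_key_of_gen (hcross y hy x (by simp)) (by omega))
      · intro y hy z hz
        rcases (PySem.List.mem_insertBy _ _ _ _).1 hy with rfl | hy
        · exact (List.pairwise_cons.1 hxs).1 z hz
        · exact hcross y hy z (by simp [hz])
  exact main _ [] (pv_pairs_pairwise_gen words) (by simp) (by simp)

-- p is kept iff it is key-minimal among the pairs of L covering one of its endpoints
def pvKeepB (L : List (Int × Int × Int)) (p : Int × Int × Int) : Bool :=
  L.all (fun q => !((decide (q.1 = p.1) || decide (q.2.1 = p.1)) && pvLexLt (pvKey q) (pvKey p))) ||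
  L.all (fun q => !((decide (q.1 = p.2.1) || decide (q.2.1 = p.2.1)) && pvLexLt (pvKey q) (pvKey p)))

-- A's two conditional appends to `added`
def pvAdd2 (a : List Int) (p : Int × Int × Int) : List Int :=
  let a1 := if p.1 ∉ a then a ++ [p.1] else a
  if p.2.1 ∉ a1 then a1 ++ [p.2.1] else a1

theorem pv_mem_pvAdd2 (a : List Int) (p : Int × Int × Int) (k : Int) :
    k ∈ pvAdd2 a p ↔ k ∈ a ∨ p.1 = k ∨ p.2.1 = k := by
  simp only [pvAdd2]
  by_cases h1 : p.1 ∈ a <;> by_cases h2 : p.2.1 ∈ a <;> by_cases h3 : p.2.1 = p.1 <;>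
    simp [h1, h2, h3, eq_comm] <;> aesop

theorem pv_keepB_false (L : List (Int × Int × Int)) (p : Int × Int × Int) :
    pvKeepB L p = false ↔
      (∃ q ∈ L, pvCovers q p.1 ∧ pvLexLt (pvKey q) (pvKey p) = true) ∧
      (∃ q ∈ L, pvCovers q p.2.1 ∧ pvLexLt (pvKey q) (pvKey p) = true) := by
  simp [pvKeepB, pvCovers, imp_iff_not_or, -Bool.forall_bool]

-- A's greedy pass over a KeyLt-sorted list keeps exactly the pvKeepB pairs
theorem pv_greedy (S : List (Int × Int × Int))
    (hpw : S.Pairwise (fun p q => pvLexLt (pvKey p) (pvKey q) = true)) :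
    ∀ (suf pre : List (Int × Int × Int)) (a : List Int) (out : List (Int × Int × Int)),
      S = pre ++ suf →
      (∀ k : Int, k ∈ a ↔ ∃ q ∈ pre, pvCovers q k) →
      (suf.foldl
        (fun (st : List Int × List (Int × Int × Int)) couple =>
          if couple.1 ∈ st.1 ∧ couple.2.1 ∈ st.1 then st
          else
            let output := st.2 ++ [couple]
            let added := if couple.1 ∉ st.1 then st.1 ++ [couple.1] else st.1
            let added := if couple.2.1 ∉ added then added ++ [couple.2.1] else added
            (added, output)) (a, out)).2 = out ++ suf.filter (fun p => pvKeepB S p) := by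
  intro suf
  induction suf with
  | nil => intro pre a out _ _; simp
  | cons p t ih =>
    intro pre a out hS hinv
    have hmem : ∀ k : Int, k ∈ a ↔
        ∃ q ∈ S, pvCovers q k ∧ pvLexLt (pvKey q) (pvKey p) = true := by
      intro k
      rw [hinv k]
      constructor
      · rintro ⟨q, hq, hcov⟩
        refine ⟨q, by simp [hS, hq], hcov, ?_⟩
        exact (List.pairwise_append.1 (hS ▸ hpw)).2.2 q hq p (by simp)
      · rintro ⟨q, hq, hcov, hlt⟩
        rw [hS, List.mem_append] at hq
        rcases hq with hq | hq
        · exact ⟨q, hq, hcov⟩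
        · rcases List.mem_cons.1 hq with rfl | hq
          · rw [pv_lex_irrefl] at hlt; exact absurd hlt (by simp)
          · have hpq := (List.pairwise_cons.1 (List.pairwise_append.1 (hS ▸ hpw)).2.1).1 q hq
            rw [pv_lex_asymm hpq] at hlt
            exact absurd hlt (by simp)
    have hcond : (p.1 ∈ a ∧ p.2.1 ∈ a) ↔ pvKeepB S p = false := by
      rw [pv_keepB_false, hmem, hmem]
    have hstep : (fun (st : List Int × List (Int × Int × Int)) couple =>
          if couple.1 ∈ st.1 ∧ couple.2.1 ∈ st.1 then st
          else
            let output := st.2 ++ [couple]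
            let added := if couple.1 ∉ st.1 then st.1 ++ [couple.1] else st.1
            let added := if couple.2.1 ∉ added then added ++ [couple.2.1] else added
            (added, output)) (a, out) p
        = if p.1 ∈ a ∧ p.2.1 ∈ a then (a, out) else (pvAdd2 a p, out ++ [p]) := rfl
    have hinv' : ∀ k : Int, (k ∈ pvAdd2 a p ↔ ∃ q ∈ pre ++ [p], pvCovers q k) := by
      intro k
      rw [pv_mem_pvAdd2]
      constructor
      · rintro (hk | hk | hk)
        · obtain ⟨q, hq, hc⟩ := (hinv k).1 hk
          exact ⟨q, by simp [hq], hc⟩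
        · exact ⟨p, by simp, Or.inl hk⟩
        · exact ⟨p, by simp, Or.inr hk⟩
      · rintro ⟨q, hq, hc⟩
        rcases List.mem_append.1 hq with hq | hq
        · exact Or.inl ((hinv k).2 ⟨q, hq, hc⟩)
        · have : q = p := by simpa using hq
          subst this
          tauto
    simp only [List.foldl_cons, hstep]
    by_cases hc : p.1 ∈ a ∧ p.2.1 ∈ a
    · rw [if_pos hc]
      have hkf : pvKeepB S p = false := hcond.1 hc
      have hskip : ∀ k : Int, (k ∈ a ↔ ∃ q ∈ pre ++ [p], pvCovers q k) := by
        intro k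
        constructor
        · intro hk
          obtain ⟨q, hq, hcv⟩ := (hinv k).1 hk
          exact ⟨q, by simp [hq], hcv⟩
        · rintro ⟨q, hq, hcv⟩
          rcases List.mem_append.1 hq with hq | hq
          · exact (hinv k).2 ⟨q, hq, hcv⟩
          · have : q = p := by simpa using hq
            subst this
            rcases hcv with e | e <;> rw [← e] <;> tauto
      rw [ih (pre ++ [p]) a out (by simp [hS]) hskip, List.filter_cons,
        if_neg (by simp [hkf])]
    · rw [if_neg hc]
      have hkt : pvKeepB S p = true := by
        rcases Bool.eq_false_or_eq_true (pvKeepB S p) with h | h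
        · exact h
        · exact absurd (hcond.2 h) hc
      rw [ih (pre ++ [p]) (pvAdd2 a p) (out ++ [p]) (by simp [hS]) hinv',
        List.filter_cons, if_pos hkt]
      simp

-- ---------- B side ----------

-- one step of B's loop, on the abstract pair (i, j, common)
def pvUpd (d : PySem.Dict Int (Int × Int × Int)) (p : Int × Int × Int) :
    PySem.Dict Int (Int × Int × Int) :=
  let key := pvKey p
  let d1 := if !d.contains p.1 || pvLexLt key (d.getD p.1 key) then d.insert p.1 key else d
  if !d1.contains p.2.1 || pvLexLt key (d1.getD p.2.1 key) then d1.insert p.2.1 key else d1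

-- |set(words[i]) & set(words[j])| is the shared-character count
theorem pv_inter_len (words : List String) (i j : Int) :
    (PySem.Set.len (PySem.Set.inter
        (PySem.Set.ofList (PySem.List.pyGetD words i "").toList)
        (PySem.Set.ofList (PySem.List.pyGetD words j "").toList)) : Int)
      = pvCommon words i j := by
  unfold pvCommon
  rw [PySem.List.dedup_eq_ofList]
  have hif : (fun (acc : Int) ch =>
      if ch ∈ (PySem.List.pyGetD words j "").toList then acc + 1 else acc)
      = (fun (acc : Int) ch =>
        if (fun c => decide (c ∈ (PySem.List.pyGetD words j "").toList)) ch = true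
        then acc + 1 else acc) := by
    funext acc ch; simp
  rw [hif, PySem.List.foldl_count_if]
  simp only [PySem.Set.len, PySem.Set.inter, zero_add, Int.natCast_inj]
  rw [← List.countP_eq_length_filter]
  apply List.countP_congr
  intro c _
  simp [PySem.Set.mem_ofList]

-- B's nested loops compute the fold of pvUpd over pvPairs
theorem pv_b_fold (words : List String) :
    ((PySem.List.pyRange 0 (PySem.List.len words) 1).foldl (fun best i =>
      let di : PySem.Set Char := PySem.Set.ofList (PySem.List.pyGetD words i "").toList
      (PySem.List.pyRange (i + 1) (PySem.List.len words) 1).foldl (fun best j =>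
        let key : Int × Int × Int :=
          (-(PySem.Set.len (PySem.Set.inter di
              (PySem.Set.ofList (PySem.List.pyGetD words j "").toList)) : Int), i, j)
        let best :=
          if !best.contains i || pvLexLt key (best.getD i key) then best.insert i key else best
        if !best.contains j || pvLexLt key (best.getD j key) then best.insert j key else best)
        best) PySem.Dict.empty)
    = (pvPairs words).foldl pvUpd PySem.Dict.empty := by
  unfold pvPairs
  rw [pv_foldl_flatMap]
  apply PySem.List.foldl_congr_mem
  intro d i _
  show _ = _
  rw [List.foldl_map]
  apply PySem.List.foldl_congr_mem
  intro d j _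
  have hkey : (-(PySem.Set.len (PySem.Set.inter
      (PySem.Set.ofList (PySem.List.pyGetD words i "").toList)
      (PySem.Set.ofList (PySem.List.pyGetD words j "").toList)) : Int), i, j)
      = pvKey (i, j, pvCommon words i j) := by
    rw [pv_inter_len]; rfl
  simp only [hkey]
  rfl

-- the running minimum step
def pvMinStep (o : Option (Int × Int × Int)) (t : Int × Int × Int) : Option (Int × Int × Int) :=
  some (match o with | none => t | some u => if pvLexLt t u then t else u)

theorem pv_minStep_absorb (o : Option (Int × Int × Int)) (t : Int × Int × Int) :
    pvMinStep (pvMinStep o t) t = pvMinStep o t := by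
  cases o with
  | none => simp [pvMinStep, pv_lex_irrefl]
  | some u =>
    by_cases h : pvLexLt t u = true <;> simp [pvMinStep, h, pv_lex_irrefl]

-- one conditional best-update, seen through get?
theorem pv_upd1_get? (d : PySem.Dict Int (Int × Int × Int)) (e k : Int) (key : Int × Int × Int) :
    (if !d.contains e || pvLexLt key (d.getD e key) then d.insert e key else d).get? k
      = if e = k then pvMinStep (d.get? k) key else d.get? k := by
  by_cases hek : e = k
  · subst hek
    cases hg : d.get? e with
    | none =>
      have hc : d.contains e = false := by rw [PySem.Dict.contains_eq_isSome_get?, hg]; rfl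
      simp [hc, pvMinStep]
    | some u =>
      have hc : d.contains e = true := by rw [PySem.Dict.contains_eq_isSome_get?, hg]; rfl
      have hgetD : d.getD e key = u := by rw [PySem.Dict.getD_eq_get?_getD, hg]; rfl
      by_cases hlt : pvLexLt key u = true <;>
        simp [hc, hgetD, hlt, PySem.Dict.get?_insert, pvMinStep, hg]
  · split_ifs with h
    · rw [PySem.Dict.get?_insert, if_neg (fun he => hek he.symm)]
    · rfl

theorem pv_upd_get? (d : PySem.Dict Int (Int × Int × Int)) (p : Int × Int × Int) (k : Int) :
    (pvUpd d p).get? k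
      = if p.1 = k ∨ p.2.1 = k then pvMinStep (d.get? k) (pvKey p) else d.get? k := by
  unfold pvUpd
  rw [pv_upd1_get?, pv_upd1_get?]
  by_cases h1 : p.1 = k <;> by_cases h2 : p.2.1 = k <;>
    simp [h1, h2, pv_minStep_absorb]

theorem pv_fold_get? (L : List (Int × Int × Int)) :
    ∀ (d : PySem.Dict Int (Int × Int × Int)) (k : Int),
      (L.foldl pvUpd d).get? k
        = ((L.filter (fun p => decide (p.1 = k) || decide (p.2.1 = k))).map pvKey).foldl
            pvMinStep (d.get? k) := by
  induction L with
  | nil => intro d k; rfl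
  | cons p t ih =>
    intro d k
    rw [List.foldl_cons, ih, List.filter_cons]
    by_cases h : p.1 = k ∨ p.2.1 = k
    · rw [if_pos (by simpa using h), List.map_cons, List.foldl_cons, pv_upd_get?, if_pos h]
    · rw [if_neg (by simpa using h), pv_upd_get?, if_neg h]

-- properties of the running minimum
theorem pv_minfold_gen (ts : List (Int × Int × Int)) :
    ∀ (o : Option (Int × Int × Int)) (m : Int × Int × Int),
      ts.foldl pvMinStep o = some m →
      (o = some m ∨ m ∈ ts) ∧ (∀ t ∈ ts, pvLexLt t m = false) ∧
        (∀ u, o = some u → pvLexLt u m = false) := by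
  induction ts with
  | nil =>
    intro o m h
    simp only [List.foldl_nil] at h
    subst h
    exact ⟨Or.inl rfl, by simp, fun u hu => by cases hu; exact pv_lex_irrefl m⟩
  | cons t ts ih =>
    intro o m h
    rw [List.foldl_cons] at h
    obtain ⟨hmem, hts, hou⟩ := ih _ m h
    cases o with
    | none =>
      have hveq : pvMinStep none t = some t := rfl
      have htm : pvLexLt t m = false := hou t hveq
      refine ⟨?_, ?_, ?_⟩
      · rcases hmem with hm | hm
        · rw [hveq] at hm; cases hm; exact Or.inr (by simp)
        · exact Or.inr (by simp [hm])
      · intro s hs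
        rcases List.mem_cons.1 hs with rfl | hs
        · exact htm
        · exact hts s hs
      · intro u hu; cases hu
    | some u =>
      by_cases hl : pvLexLt t u = true
      · have hveq : pvMinStep (some u) t = some t := by simp [pvMinStep, hl]
        have htm : pvLexLt t m = false := hou t hveq
        have hum : pvLexLt u m = false := by
          rcases Bool.eq_false_or_eq_true (pvLexLt u m) with htrue | hfalse
          · exact absurd (pv_lex_trans hl htrue) (by simp [htm])
          · exact hfalse
        refine ⟨?_, ?_, ?_⟩
        · rcases hmem with hm | hm
          · rw [hveq] at hm; cases hm; exact Or.inr (by simp)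
          · exact Or.inr (by simp [hm])
        · intro s hs
          rcases List.mem_cons.1 hs with rfl | hs
          · exact htm
          · exact hts s hs
        · intro w hw; cases hw; exact hum
      · have hlf : pvLexLt t u = false := by simpa using hl
        have hveq : pvMinStep (some u) t = some u := by simp [pvMinStep, hlf]
        have hum : pvLexLt u m = false := hou u hveq
        have htm : pvLexLt t m = false := by
          rcases Bool.eq_false_or_eq_true (pvLexLt t m) with htrue | hfalse
          · by_cases hut : u = t
            · subst hut; exact absurd htrue (by simp [hum])
            · have hut2 : pvLexLt u t = true := by
                rcases Bool.eq_false_or_eq_true (pvLexLt u t) with h2 | h2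
                · exact h2
                · exact absurd (pv_lex_total hlf h2).symm hut
              exact absurd (pv_lex_trans hut2 htrue) (by simp [hum])
          · exact hfalse
        refine ⟨?_, ?_, ?_⟩
        · rcases hmem with hm | hm
          · rw [hveq] at hm; cases hm; exact Or.inl rfl
          · exact Or.inr (by simp [hm])
        · intro s hs
          rcases List.mem_cons.1 hs with rfl | hs
          · exact htm
          · exact hts s hs
        · intro w hw; cases hw; exact hum

theorem pv_minfold_some_start (ts : List (Int × Int × Int)) :
    ∀ u : Int × Int × Int, (ts.foldl pvMinStep (some u)).isSome := by
  induction ts with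
  | nil => intro u; rfl
  | cons t ts ih =>
    intro u
    rw [List.foldl_cons]
    have hstep : pvMinStep (some u) t = some (if pvLexLt t u then t else u) := rfl
    rw [hstep]
    exact ih _

theorem pv_minfold_isSome (ts : List (Int × Int × Int)) (h : ts ≠ []) :
    (ts.foldl pvMinStep none).isSome := by
  cases ts with
  | nil => exact absurd rfl h
  | cons t ts =>
    rw [List.foldl_cons]
    exact pv_minfold_some_start ts t

-- uniqueness of the minimum
theorem pv_min_unique {ts : List (Int × Int × Int)} {m mm : Int × Int × Int}
    (h1 : m ∈ ts) (h2 : ∀ t ∈ ts, pvLexLt t m = false)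
    (h3 : mm ∈ ts) (h4 : ∀ t ∈ ts, pvLexLt t mm = false) : m = mm :=
  pv_lex_total (h4 m h1) (h2 mm h3)

-- keys of B's dict stay unique
theorem pv_fold_nodup_keys (L : List (Int × Int × Int)) :
    ∀ (d : PySem.Dict Int (Int × Int × Int)), d.keys.Nodup → (L.foldl pvUpd d).keys.Nodup := by
  induction L with
  | nil => intro d h; exact h
  | cons p t ih =>
    intro d h
    rw [List.foldl_cons]
    apply ih
    dsimp only [pvUpd]
    split_ifs <;>
      first
        | exact PySem.Dict.nodup_keys_insert _ _ _ (PySem.Dict.nodup_keys_insert _ _ _ h)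
        | exact PySem.Dict.nodup_keys_insert _ _ _ h
        | exact h

-- ---------- the insertion sort of B's final line ----------

theorem pv_insertBy_perm (x : Int × Int × Int) (ys : List (Int × Int × Int)) :
    (PySem.List.insertBy (fun a b => pvLexLt a b) x ys).Perm (x :: ys) := by
  induction ys with
  | nil => simp [PySem.List.insertBy]
  | cons y t ih =>
    by_cases h : pvLexLt x y = true
    · simp [PySem.List.insertBy, h]
    · rw [Bool.not_eq_true] at h
      simp only [PySem.List.insertBy, h, Bool.false_eq_true, if_false]
      exact (List.Perm.cons y ih).trans (List.Perm.swap x y t)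

theorem pv_sortLex_perm (xs : List (Int × Int × Int)) : (pvSortLex xs).Perm xs := by
  unfold pvSortLex
  suffices h : ∀ (xs acc : List (Int × Int × Int)),
      (xs.foldl (fun acc x => PySem.List.insertBy (fun a b => pvLexLt a b) x acc) acc).Perm
        (acc ++ xs) by
    simpa using h xs []
  intro xs
  induction xs with
  | nil => intro acc; simp
  | cons x t ih =>
    intro acc
    rw [List.foldl_cons]
    refine (ih _).trans ?_
    refine (List.Perm.append_right t (pv_insertBy_perm x acc)).trans ?_
    simpa using List.perm_middle.symm

theorem pv_insertBy_pairwise_le (x : Int × Int × Int) (ys : List (Int × Int × Int))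
    (h : ys.Pairwise (fun a b => pvLexLt b a = false)) :
    (PySem.List.insertBy (fun a b => pvLexLt a b) x ys).Pairwise
      (fun a b => pvLexLt b a = false) := by
  induction ys with
  | nil => simp [PySem.List.insertBy]
  | cons y t ih =>
    by_cases hb : pvLexLt x y = true
    · simp only [PySem.List.insertBy, hb, if_pos]
      refine List.pairwise_cons.2 ⟨?_, h⟩
      intro z hz
      rcases List.mem_cons.1 hz with rfl | hz
      · exact pv_lex_asymm hb
      · have hyz : pvLexLt z y = false := (List.pairwise_cons.1 h).1 z hz
        rcases Bool.eq_false_or_eq_true (pvLexLt z x) with htrue | hfalse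
        · exact absurd (pv_lex_trans htrue hb) (by simp [hyz])
        · exact hfalse
    · rw [Bool.not_eq_true] at hb
      simp only [PySem.List.insertBy, hb]
      simp only [Bool.false_eq_true, if_false]
      refine List.pairwise_cons.2 ⟨?_, ih (List.pairwise_cons.1 h).2⟩
      intro z hz
      rcases (PySem.List.mem_insertBy _ _ _ _).1 hz with rfl | hz
      · exact hb
      · exact (List.pairwise_cons.1 h).1 z hz

theorem pv_sortLex_pairwise_le (xs : List (Int × Int × Int)) :
    (pvSortLex xs).Pairwise (fun a b => pvLexLt b a = false) := by
  unfold pvSortLex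
  suffices h : ∀ (xs acc : List (Int × Int × Int)),
      acc.Pairwise (fun a b => pvLexLt b a = false) →
      (xs.foldl (fun acc x => PySem.List.insertBy (fun a b => pvLexLt a b) x acc) acc).Pairwise
        (fun a b => pvLexLt b a = false) by
    exact h xs [] (by simp)
  intro xs
  induction xs with
  | nil => intro acc h; exact h
  | cons x t ih =>
    intro acc h
    rw [List.foldl_cons]
    exact ih _ (pv_insertBy_pairwise_le x acc h)

-- two strictly ordered lists with the same members are equal
theorem pv_sorted_eq : ∀ (l1 l2 : List (Int × Int × Int)),
    l1.Pairwise (fun a b => pvLexLt a b = true) →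
    l2.Pairwise (fun a b => pvLexLt a b = true) →
    (∀ x, x ∈ l1 ↔ x ∈ l2) → l1 = l2 := by
  intro l1
  induction l1 with
  | nil =>
    intro l2 _ _ hmem
    cases l2 with
    | nil => rfl
    | cons b s => exact absurd ((hmem b).2 (by simp)) (by simp)
  | cons a t ih =>
    intro l2 h1 h2 hmem
    cases l2 with
    | nil => exact absurd ((hmem a).1 (by simp)) (by simp)
    | cons b s =>
      have hab : a = b := by
        have hbl1 := (hmem b).2 (by simp)
        have hal2 := (hmem a).1 (by simp)
        rcases List.mem_cons.1 hbl1 with heq | hbt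
        · exact heq.symm
        · rcases List.mem_cons.1 hal2 with heq | has
          · exact heq
          · have hba := (List.pairwise_cons.1 h1).1 b hbt
            have hbs := (List.pairwise_cons.1 h2).1 a has
            exact absurd hbs (by simp [pv_lex_asymm hba])
      subst hab
      have hts : ∀ x, x ∈ t ↔ x ∈ s := by
        intro x
        constructor
        · intro hx
          have hx2 := (hmem x).1 (by simp [hx])
          rcases List.mem_cons.1 hx2 with rfl | hxs
          · exact absurd ((List.pairwise_cons.1 h1).1 x hx) (by simp [pv_lex_irrefl])
          · exact hxs
        · intro hx
          have hx2 := (hmem x).2 (by simp [hx])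
          rcases List.mem_cons.1 hx2 with rfl | hxt
          · exact absurd ((List.pairwise_cons.1 h2).1 x hx) (by simp [pv_lex_irrefl])
          · exact hxt
      rw [ih s (List.pairwise_cons.1 h1).2 (List.pairwise_cons.1 h2).2 hts]

-- pvKeepB, read as a proposition
theorem pv_keepB_true_iff (L : List (Int × Int × Int)) (p : Int × Int × Int) :
    pvKeepB L p = true ↔
      (∀ q ∈ L, (q.1 = p.1 ∨ q.2.1 = p.1) → pvLexLt (pvKey q) (pvKey p) = false) ∨
      (∀ q ∈ L, (q.1 = p.2.1 ∨ q.2.1 = p.2.1) → pvLexLt (pvKey q) (pvKey p) = false) := by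
  simp [pvKeepB, imp_iff_not_or, -Bool.forall_bool]

theorem define_order_of_operations_spec : Claim_equal_define_order_of_operations := by
  intro words _
  show define_order_of_operations words = define_order_of_operations_alt words
  simp only [define_order_of_operations, define_order_of_operations_alt]
  rw [pv_orderA, pv_b_fold]
  set S : List (Int × Int × Int) :=
    PySem.List.sorted (pvPairs words) (fun a => a.2.2) true with hSdef
  set D : PySem.Dict Int (Int × Int × Int) :=
    (pvPairs words).foldl pvUpd PySem.Dict.empty with hDdef
  have hpwS : S.Pairwise (fun p q => pvLexLt (pvKey p) (pvKey q) = true) :=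
    pv_sorted_pairwise_key words
  rw [pv_greedy S hpwS S [] [] [] rfl (by intro k; simp)]
  rw [List.nil_append]
  have hget : ∀ k : Int, D.get? k
      = (((pvPairs words).filter (fun p => decide (p.1 = k) || decide (p.2.1 = k))).map
          pvKey).foldl pvMinStep none := by
    intro k
    rw [hDdef, pv_fold_get? (pvPairs words) PySem.Dict.empty k, PySem.Dict.get?_empty]
  have hSmem : ∀ p : Int × Int × Int, p ∈ S ↔ p ∈ pvPairs words := by
    intro p; rw [hSdef, PySem.List.mem_sorted]
  have hnodupD : D.keys.Nodup :=
    pv_fold_nodup_keys (pvPairs words) PySem.Dict.empty PySem.Dict.nodup_keys_empty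
  have hVmem : ∀ t : Int × Int × Int,
      t ∈ PySem.Set.ofList D.values ↔ ∃ k : Int, D.get? k = some t := by
    intro t
    rw [PySem.Set.mem_ofList]
    constructor
    · intro ht
      obtain ⟨⟨k, v⟩, hkv, hv⟩ := List.mem_map.1 ht
      refine ⟨k, ?_⟩
      rw [PySem.Dict.get?_of_mem_items D hkv hnodupD]
      exact congrArg some hv
    · rintro ⟨k, hk⟩
      exact List.mem_map.2 ⟨(k, t), PySem.Dict.mem_items_of_get?_eq_some D hk, rfl⟩
  have hmemWV : ∀ t : Int × Int × Int,
      t ∈ (S.filter (fun p => pvKeepB S p)).map pvKey ↔ t ∈ PySem.Set.ofList D.values := by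
    intro t
    rw [hVmem]
    constructor
    · intro ht
      obtain ⟨p, hpF, rfl⟩ := List.mem_map.1 ht
      obtain ⟨hpS, hkeep⟩ := List.mem_filter.1 hpF
      have hpP : p ∈ pvPairs words := (hSmem p).1 hpS
      have key_case : ∀ e : Int, (p.1 = e ∨ p.2.1 = e) →
          (∀ q ∈ S, (q.1 = e ∨ q.2.1 = e) → pvLexLt (pvKey q) (pvKey p) = false) →
          ∃ k : Int, D.get? k = some (pvKey p) := by
        intro e hpe hall
        refine ⟨e, ?_⟩
        rw [hget e]
        set ts := ((pvPairs words).filter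
          (fun q => decide (q.1 = e) || decide (q.2.1 = e))).map pvKey with hts
        have hmem1 : pvKey p ∈ ts :=
          List.mem_map.2 ⟨p, List.mem_filter.2 ⟨hpP, by simpa using hpe⟩, rfl⟩
        have hmin : ∀ u ∈ ts, pvLexLt u (pvKey p) = false := by
          intro u hu
          obtain ⟨q, hqf, rfl⟩ := List.mem_map.1 hu
          obtain ⟨hqP, hqc⟩ := List.mem_filter.1 hqf
          exact hall q ((hSmem q).2 hqP) (by simpa using hqc)
        cases hm : ts.foldl pvMinStep none with
        | none =>
          have hs := pv_minfold_isSome ts (by intro h0; rw [h0] at hmem1; cases hmem1)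
          rw [hm] at hs; cases hs
        | some m =>
          obtain ⟨hm1, hm2, _⟩ := pv_minfold_gen ts none m hm
          have hmmem : m ∈ ts := by
            rcases hm1 with h0 | h0
            · cases h0
            · exact h0
          rw [pv_min_unique hmmem hm2 hmem1 hmin]
      rcases (pv_keepB_true_iff S p).1 hkeep with hall | hall
      · exact key_case p.1 (Or.inl rfl) hall
      · exact key_case p.2.1 (Or.inr rfl) hall
    · rintro ⟨k, hk⟩
      rw [hget k] at hk
      obtain ⟨hm1, hm2, _⟩ := pv_minfold_gen _ none t hk
      have htmem : t ∈ ((pvPairs words).filter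
          (fun q => decide (q.1 = k) || decide (q.2.1 = k))).map pvKey := by
        rcases hm1 with h0 | h0
        · cases h0
        · exact h0
      obtain ⟨p, hpf, rfl⟩ := List.mem_map.1 htmem
      obtain ⟨hpP, hpc⟩ := List.mem_filter.1 hpf
      have hpc2 : p.1 = k ∨ p.2.1 = k := by simpa using hpc
      have hkeep : pvKeepB S p = true := by
        rw [pv_keepB_true_iff]
        rcases hpc2 with rfl | rfl
        · left
          intro q hqS hqc
          exact hm2 (pvKey q)
            (List.mem_map.2 ⟨q, List.mem_filter.2 ⟨(hSmem q).1 hqS, by simpa using hqc⟩, rfl⟩)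
        · right
          intro q hqS hqc
          exact hm2 (pvKey q)
            (List.mem_map.2 ⟨q, List.mem_filter.2 ⟨(hSmem q).1 hqS, by simpa using hqc⟩, rfl⟩)
      exact List.mem_map.2 ⟨p, List.mem_filter.2 ⟨(hSmem p).2 hpP, hkeep⟩, rfl⟩
  have hpwW : ((S.filter (fun p => pvKeepB S p)).map pvKey).Pairwise
      (fun a b => pvLexLt a b = true) :=
    List.pairwise_map.2 (hpwS.sublist List.filter_sublist)
  have hndV : (PySem.Set.ofList D.values).Nodup := PySem.Set.nodup_ofList _
  have hndSort : (pvSortLex (PySem.Set.ofList D.values)).Nodup :=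
    ((pv_sortLex_perm _).nodup_iff).2 hndV
  have hpwSort : (pvSortLex (PySem.Set.ofList D.values)).Pairwise
      (fun a b => pvLexLt a b = true) := by
    have hle := pv_sortLex_pairwise_le (PySem.Set.ofList D.values)
    refine (hle.and hndSort).imp ?_
    rintro a b ⟨hba, hne⟩
    rcases Bool.eq_false_or_eq_true (pvLexLt a b) with htrue | hfalse
    · exact htrue
    · exact absurd (pv_lex_total hfalse hba) hne
  have hsorteq : pvSortLex (PySem.Set.ofList D.values)
      = (S.filter (fun p => pvKeepB S p)).map pvKey := by
    apply pv_sorted_eq _ _ hpwSort hpwW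
    intro x
    rw [(pv_sortLex_perm _).mem_iff, hmemWV]
  rw [hsorteq, List.map_map]
  have hid : ∀ p ∈ S.filter (fun p => pvKeepB S p),
      ((fun t : Int × Int × Int => (t.2.1, t.2.2, -t.1)) ∘ pvKey) p = p := by
    intro p _
    obtain ⟨a, b, c⟩ := p
    simp [pvKey]
  rw [List.map_congr_left hid]
  simp
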